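-- pv_equiv track=rewrite | github.com/pisterlabs/promptset | data/scraping-2.0/repos/igorsterner~TongueSwitcher/src~tongueswitcher_evaluation.py | remove_islands
-- ===== SOURCE A (Python) =====
-- def remove_islands(tokens, labels):
--     new_list = []
--     consecutive_en = 0
--
--     for i in range(len(tokens)):
--         if labels[i] != 'D':
--             consecutive_en += 1
--         else:
--             if consecutive_en > 4:
--                 for _ in range(consecutive_en): new_list.append('D')
--             else:
--                 new_list = new_list + labels[i-consecutive_en:i]
--             new_list.append('D')
--             consecutive_en = 0
--
--     if consecutive_en > 4:
--         for _ in range(consecutive_en): new_list.append('D')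
--     elif consecutive_en > 0:
--         new_list = new_list + labels[-consecutive_en:]
--
--     return new_list
-- ===== SOURCE B (Python) =====
-- def remove_islands(tokens, labels):
--     s = labels[:len(tokens)]
--     out = []
--     n = len(s)
--     i = 0
--     while i < n:
--         j = i
--         while j < n and (s[j] == 'D') == (s[i] == 'D'):
--             j += 1
--         if s[i] == 'D' or j - i > 4:
--             out += ['D'] * (j - i)
--         else:
--             out += s[i:j]
--         i = j
--     return out
-- ===== Notes on version B (the rewrite author's own statement) =====
-- stated objective: alternative
-- what changed: B truncates labels to len(tokens) once and processes maximal runs with a two-pointer run scanner (emit run or 'D'-block per run), replacing A's per-index counter loop with backward slices and its quadratic list re-concatenation.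
-- intended difference: When len(labels) > len(tokens) and the processed prefix ends in a non-'D' run of length 1..4, A appends labels[-k:] (the last k of the untruncated labels, which are not the tokens' labels) while B appends that trailing run itself, which is the intended smoothing of the aligned labels. — e.g. on remove_islands(["a"], ["E", "X"]): A returns ["X"], B returns ["E"]
import Mathlib
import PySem

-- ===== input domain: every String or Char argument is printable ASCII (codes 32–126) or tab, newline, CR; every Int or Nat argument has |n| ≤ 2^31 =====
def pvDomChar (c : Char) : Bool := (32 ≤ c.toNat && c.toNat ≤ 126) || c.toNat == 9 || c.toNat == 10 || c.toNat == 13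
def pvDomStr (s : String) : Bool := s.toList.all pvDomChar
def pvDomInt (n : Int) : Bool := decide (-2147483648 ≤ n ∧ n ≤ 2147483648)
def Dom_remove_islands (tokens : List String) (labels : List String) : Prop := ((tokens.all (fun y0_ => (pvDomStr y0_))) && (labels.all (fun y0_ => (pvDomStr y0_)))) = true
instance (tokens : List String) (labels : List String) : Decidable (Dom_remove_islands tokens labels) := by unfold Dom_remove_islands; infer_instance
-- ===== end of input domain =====

-- B replaces A's per-index counter loop (with backward slices and repeated whole-list
-- re-concatenation) by run-based processing of labels truncated to len(tokens); on
-- misaligned inputs with a short trailing non-'D' run B returns the run itself where A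
-- returns the last k elements of the untruncated labels (see D_ below).

-- ===== PORT A =====
-- loop body of A's 'for i in range(len(tokens))', as a helper
def aStep (labels : List String) (st : List String × Int) (i : Int) : List String × Int :=
  if PySem.List.pyGetD labels i "" ≠ "D" then
    (st.1, st.2 + 1)
  else
    let nl := if st.2 > 4 then
        (PySem.List.pyRange 0 st.2 1).foldl (fun l _ => l ++ ["D"]) st.1
      else st.1 ++ PySem.List.slice labels (some (i - st.2)) (some i)
    (nl ++ ["D"], 0)

def remove_islands (tokens : List String) (labels : List String) : List String :=
  let res := (PySem.List.pyRange 0 tokens.length 1).foldl (aStep labels) ([], 0)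
  if res.2 > 4 then
    (PySem.List.pyRange 0 res.2 1).foldl (fun l _ => l ++ ["D"]) res.1
  else if res.2 > 0 then
    res.1 ++ PySem.List.slice labels (some (-res.2)) none
  else res.1

-- ===== PORT B =====
-- B's inner while loop scans the maximal run sharing the head's 'D'-ness;
-- ported as takeWhile/dropWhile on that same predicate, recursing on the rest.
def altRuns : List String → List String
  | [] => []
  | l :: rest =>
    let run := l :: rest.takeWhile (fun x => (x == "D") == (l == "D"))
    (if l == "D" || run.length > 4 then List.replicate run.length "D" else run)
      ++ altRuns (rest.dropWhile (fun x => (x == "D") == (l == "D")))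
termination_by s => s.length
decreasing_by
  simp only [List.length_cons]
  exact Nat.lt_succ_of_le (List.Sublist.length_le (List.dropWhile_sublist _))

def remove_islands_alt (tokens : List String) (labels : List String) : List String :=
  altRuns (PySem.List.slice labels none (some (tokens.length : Int)))

-- ===== PRECONDITION & SPEC =====
-- Pre_ excludes exactly the inputs with len(tokens) > len(labels), on which A raises IndexError.
def Pre_remove_islands (tokens : List String) (labels : List String) : Prop :=
  tokens.length ≤ labels.length
instance (tokens : List String) (labels : List String) : Decidable (Pre_remove_islands tokens labels) := by unfold Pre_remove_islands; infer_instance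
def pvWitness_remove_islands : List String × List String := (["a"], ["D"])

-- trailNonD xs = the (possibly empty) maximal suffix of xs containing no "D".
def trailNonD : List String → List String
  | [] => []
  | x :: xs => if "D" ∈ (x :: xs : List String) then trailNonD xs else x :: xs

-- When len(labels) > len(tokens) and the truncated label sequence ends in a non-'D' run of
-- length k with 1 ≤ k ≤ 4, A appends labels[-k:] (last k of the UNTRUNCATED labels) while B
-- appends the trailing run itself, which is the intended smoothing of the aligned labels.
def D_remove_islands (tokens : List String) (labels : List String) : Prop :=
  let t := trailNonD (labels.take tokens.length)
  1 ≤ t.length ∧ t.length ≤ 4 ∧ labels.drop (labels.length - t.length) ≠ t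
instance (tokens : List String) (labels : List String) : Decidable (D_remove_islands tokens labels) := by unfold D_remove_islands; infer_instance

def Spec_remove_islands (tokens : List String) (labels : List String) (out : List String) : Prop := ¬ D_remove_islands tokens labels → out = remove_islands_alt tokens labels
instance (tokens : List String) (labels : List String) (out : List String) : Decidable (Spec_remove_islands tokens labels out) := by unfold Spec_remove_islands; infer_instance

def pvDiffWitness_remove_islands : List String × List String := (["a"], ["E", "X"])
def pvDiffWitnessOut_remove_islands : (List String) × (List String) := (["X"], ["E"])

-- ===== CLAIM (what is proved, stated in full; the proofs are below) =====
def Claim_unchanged_remove_islands : Prop := ∀ (tokens : List String) (labels : List String), Dom_remove_islands tokens labels → Pre_remove_islands tokens labels → Spec_remove_islands tokens labels (remove_islands tokens labels)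
def Claim_changed_remove_islands : Prop := Dom_remove_islands (pvDiffWitness_remove_islands.1) (pvDiffWitness_remove_islands.2) ∧ Pre_remove_islands (pvDiffWitness_remove_islands.1) (pvDiffWitness_remove_islands.2) ∧ D_remove_islands (pvDiffWitness_remove_islands.1) (pvDiffWitness_remove_islands.2) ∧ remove_islands (pvDiffWitness_remove_islands.1) (pvDiffWitness_remove_islands.2) = pvDiffWitnessOut_remove_islands.1 ∧ remove_islands_alt (pvDiffWitness_remove_islands.1) (pvDiffWitness_remove_islands.2) = pvDiffWitnessOut_remove_islands.2 ∧ pvDiffWitnessOut_remove_islands.1 ≠ pvDiffWitnessOut_remove_islands.2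
def Claim_exact_remove_islands : Prop := ∀ (tokens : List String) (labels : List String), Dom_remove_islands tokens labels → Pre_remove_islands tokens labels → D_remove_islands tokens labels → remove_islands tokens labels ≠ remove_islands_alt tokens labels

-- ===== LEMMAS AND PROOFS =====

-- handling of a finished non-'D' run
def runTail (p : List String) : List String :=
  if p.length > 4 then List.replicate p.length "D" else p

-- the element-wise reference loop shared by both proofs: state (acc, pending non-'D' run)
def specLoop : List String → List String → List String → List String × List String
  | [], acc, pend => (acc, pend)
  | x :: xs, acc, pend =>
    if x ≠ "D" then specLoop xs acc (pend ++ [x])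
    else specLoop xs (acc ++ runTail pend ++ ["D"]) []

-- the result shape both ports will be reduced to
def spec1 (s : List String) : List String :=
  (specLoop s [] []).1 ++ runTail (specLoop s [] []).2

-- A's inner "for _ in range(c): append 'D'" loop yields an appended replicate
theorem foldl_appendD (r : List Int) : ∀ (acc : List String),
    r.foldl (fun l _ => l ++ ["D"]) acc = acc ++ List.replicate r.length "D" := by
  induction r with
  | nil => simp
  | cons a r ih =>
    intro acc
    simp [List.foldl_cons, ih, List.replicate_succ]

-- the accumulator distributes out of specLoop
theorem specLoop_acc : ∀ (xs acc pend : List String),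
    specLoop xs acc pend = (acc ++ (specLoop xs [] pend).1, (specLoop xs [] pend).2) := by
  intro xs
  induction xs with
  | nil => intro acc pend; simp [specLoop]
  | cons x xs ih =>
    intro acc pend
    by_cases hx : x = "D"
    · simp only [specLoop, hx, if_neg, not_not]
      rw [ih (acc ++ _ ++ _), ih ([] ++ _ ++ _)]
      simp
    · simp only [specLoop, if_pos hx]
      rw [ih acc, ih []]

-- a run of "D"s is flushed one 'D' per element
theorem specLoop_dRun : ∀ (r : List String), (∀ x ∈ r, x = "D") → ∀ (t acc : List String),
    specLoop (r ++ t) acc [] = specLoop t (acc ++ List.replicate r.length "D") [] := by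
  intro r
  induction r with
  | nil => intro _ t acc; simp
  | cons a r ih =>
    intro h t acc
    have ha : a = "D" := h a (by simp)
    simp only [List.cons_append, specLoop, ha, if_neg, not_not]
    rw [ih (fun x hx => h x (by simp [hx])) t]
    simp [List.replicate_succ, runTail]

-- a run of non-"D"s is pushed onto the pending buffer
theorem specLoop_eRun : ∀ (r : List String), (∀ x ∈ r, x ≠ "D") → ∀ (t acc pend : List String),
    specLoop (r ++ t) acc pend = specLoop t acc (pend ++ r) := by
  intro r
  induction r with
  | nil => intro _ t acc pend; simp
  | cons a r ih =>
    intro h t acc pend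
    have ha : a ≠ "D" := h a (by simp)
    simp only [List.cons_append, specLoop, if_pos ha]
    rw [ih (fun x hx => h x (by simp [hx])) t]
    simp

theorem trailNonD_of_not_mem {xs : List String} (h : "D" ∉ xs) : trailNonD xs = xs := by
  cases xs with
  | nil => rfl
  | cons x xs => simp only [trailNonD]; rw [if_neg h]

-- the final pending buffer is exactly the maximal trailing non-'D' run
theorem specLoop_snd : ∀ (xs acc pend : List String),
    (specLoop xs acc pend).2 = if "D" ∈ xs then trailNonD xs else pend ++ xs := by
  intro xs
  induction xs with
  | nil => intro acc pend; simp [specLoop]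
  | cons x xs ih =>
    intro acc pend
    by_cases hx : x = "D"
    · subst hx
      simp only [specLoop, if_neg, not_not]
      rw [ih]
      have hmem : "D" ∈ ("D" :: xs : List String) := by simp
      rw [if_pos hmem]
      simp only [trailNonD]
      rw [if_pos hmem]
      by_cases h2 : "D" ∈ xs
      · simp [h2]
      · simp [h2, trailNonD_of_not_mem h2]
    · have hne : ¬ ("D" = x) := fun h => hx h.symm
      simp only [specLoop, if_pos hx]
      rw [ih]
      by_cases h2 : "D" ∈ xs
      · have hm : "D" ∈ (x :: xs : List String) := by simp [h2]
        rw [if_pos h2, if_pos hm]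
        simp only [trailNonD]
        rw [if_pos hm]
      · have hm : "D" ∉ (x :: xs : List String) := by
          simp only [List.mem_cons, not_or]; exact ⟨hne, h2⟩
        rw [if_neg h2, if_neg hm]
        simp

theorem specLoop_pend (s : List String) : (specLoop s [] []).2 = trailNonD s := by
  rw [specLoop_snd]
  by_cases h : "D" ∈ s
  · simp [h]
  · simp [h, trailNonD_of_not_mem h]

-- the head of a nonempty dropWhile fails the predicate
theorem dropWhile_head_false {α : Type} (p : α → Bool) :
    ∀ (l : List α) (d : α) (t : List α), l.dropWhile p = d :: t → p d = false := by
  intro l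
  induction l with
  | nil => intro d t h; simp [List.dropWhile] at h
  | cons a l ih =>
    intro d t h
    rw [List.dropWhile_cons] at h
    by_cases ha : p a
    · rw [if_pos ha] at h; exact ih d t h
    · rw [if_neg ha] at h
      cases h
      simpa using ha

-- B's run recursion equals the reference loop plus final-run handling
theorem altRuns_eq_spec : ∀ (m : Nat) (s : List String), s.length ≤ m → altRuns s = spec1 s := by
  intro m
  induction m with
  | zero =>
    intro s hs
    have : s = [] := by cases s with | nil => rfl | cons a l => simp at hs
    subst this
    simp [altRuns, spec1, specLoop, runTail]
  | succ m ih =>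
    intro s hs
    cases s with
    | nil => simp [altRuns, spec1, specLoop, runTail]
    | cons l rest =>
      have hdwlen : (rest.dropWhile (fun x => (x == "D") == (l == "D"))).length ≤ m := by
        have h1 := List.Sublist.length_le (List.dropWhile_sublist
          (p := fun x => (x == "D") == (l == "D")) (l := rest))
        simp at hs
        omega
      have ihdw := ih _ hdwlen
      have hsplit : l :: rest =
          (l :: rest.takeWhile (fun x => (x == "D") == (l == "D"))) ++
            rest.dropWhile (fun x => (x == "D") == (l == "D")) := by
        simp [List.takeWhile_append_dropWhile]
      by_cases hl : l = "D"
      · -- a run of 'D's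
        have hall : ∀ x ∈ (l :: rest.takeWhile (fun x => (x == "D") == (l == "D"))),
            x = "D" := by
          intro x hx
          rcases List.mem_cons.mp hx with h | h
          · rw [h, hl]
          · have := List.mem_takeWhile_imp h
            simpa [hl] using this
        have h1 : spec1 (l :: rest) =
            List.replicate (l :: rest.takeWhile (fun x => (x == "D") == (l == "D"))).length "D" ++
              spec1 (rest.dropWhile (fun x => (x == "D") == (l == "D"))) := by
          unfold spec1
          conv_lhs => rw [hsplit]
          rw [specLoop_dRun _ hall, specLoop_acc]
          simp [List.append_assoc]
        rw [h1, ← ihdw, altRuns]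
        rw [if_pos (by simp [hl])]
      · -- a run of non-'D's
        have hall : ∀ x ∈ (l :: rest.takeWhile (fun x => (x == "D") == (l == "D"))),
            x ≠ "D" := by
          intro x hx
          rcases List.mem_cons.mp hx with h | h
          · rw [h]; exact hl
          · have := List.mem_takeWhile_imp h
            simpa [hl] using this
        have hrt : (if (l == "D") ||
              decide ((l :: rest.takeWhile (fun x => (x == "D") == (l == "D"))).length > 4)
            then List.replicate
              (l :: rest.takeWhile (fun x => (x == "D") == (l == "D"))).length "D"
            else (l :: rest.takeWhile (fun x => (x == "D") == (l == "D")))) =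
            runTail (l :: rest.takeWhile (fun x => (x == "D") == (l == "D"))) := by
          rw [runTail]
          by_cases h4 : (l :: rest.takeWhile (fun x => (x == "D") == (l == "D"))).length > 4
          · rw [if_pos h4, if_pos (by simp only [List.length_cons] at h4; simp; right; omega)]
          · rw [if_neg h4, if_neg (by simp only [List.length_cons] at h4; simp [hl]; omega)]
        cases hdw : rest.dropWhile (fun x => (x == "D") == (l == "D")) with
        | nil =>
          have h1 : spec1 (l :: rest) =
              runTail (l :: rest.takeWhile (fun x => (x == "D") == (l == "D"))) := by
            unfold spec1
            conv_lhs => rw [hsplit, hdw]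
            rw [specLoop_eRun _ hall]
            simp [specLoop]
          rw [h1, altRuns, hdw]
          simp only [altRuns, List.append_nil]
          exact hrt
        | cons d t =>
          have hd : d = "D" := by
            have := dropWhile_head_false _ rest d t hdw
            simpa [hl] using this
          subst hd
          have h1 : spec1 (l :: rest) =
              runTail (l :: rest.takeWhile (fun x => (x == "D") == (l == "D"))) ++
                spec1 ("D" :: t) := by
            unfold spec1
            conv_lhs => rw [hsplit, hdw]
            rw [specLoop_eRun _ hall]
            simp only [List.nil_append, specLoop, if_neg, not_not]
            rw [specLoop_acc t (runTail (l :: rest.takeWhile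
                  (fun x => (x == "D") == (l == "D"))) ++ ["D"]),
               specLoop_acc t (runTail [] ++ ["D"])]
            simp [runTail, List.append_assoc]
          rw [hdw] at ihdw
          rw [h1, altRuns, hdw, ← ihdw, hrt]

-- A's indexed fold equals the reference loop (inside Pre_)
theorem foldA (labels : List String) (n : Nat) (hn : n ≤ labels.length) :
    ∀ (xs : List String) (k : Nat) (acc pend : List String),
      k ≤ n → xs = (labels.take n).drop k → pend.length ≤ k →
      pend = ((labels.take n).drop (k - pend.length)).take pend.length →
      (PySem.List.pyRange (k : Int) (n : Int) 1).foldl (aStep labels) (acc, (pend.length : Int)) =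
        ((specLoop xs acc pend).1, ((specLoop xs acc pend).2.length : Int)) := by
  intro xs
  induction xs with
  | nil =>
    intro k acc pend hkn hxs hlen hrep
    have hlen' : (labels.take n).length = n := by simp [hn]
    have hk : k = n := by
      have := congrArg List.length hxs
      simp [hlen'] at this
      omega
    subst hk
    rw [PySem.List.pyRange_one_eq_nil (le_refl _)]
    simp [specLoop]
  | cons x xs ih =>
    intro k acc pend hkn hxs hlen hrep
    have hlen' : (labels.take n).length = n := by simp [hn]
    have hk : k < n := by
      have := congrArg List.length hxs
      simp [hlen'] at this
      omega
    have hx : (labels.take n)[k]'(by omega) = x := by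
      have : ((labels.take n).drop k)[0]'(by rw [← hxs]; simp) = x := by simp [← hxs]
      simpa using this
    have hxs' : xs = (labels.take n).drop (k + 1) := by
      have h1 : ((labels.take n).drop k).drop 1 = (labels.take n).drop (k + 1) := by
        rw [List.drop_drop]
      rw [← hxs] at h1
      simpa using h1
    have hget : PySem.List.pyGetD labels (k : Int) "" = x := by
      rw [PySem.List.pyGetD_natCast]
      rw [List.getD_eq_getElem _ _ (by omega)]
      rw [← hx, List.getElem_take]
    rw [PySem.List.pyRange_one_cons (by exact_mod_cast hk)]
    rw [List.foldl_cons]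
    by_cases hxd : x = "D"
    · -- labels[i] == 'D': flush
      have hstep : aStep labels (acc, (pend.length : Int)) (k : Int) =
          ((acc ++ runTail pend ++ ["D"]), (0 : Int)) := by
        rw [aStep, hget]
        simp only [hxd, ne_eq, if_neg, not_not]
        congr 1
        rw [runTail]
        by_cases h4 : pend.length > 4
        · have h4' : ((pend.length : Int) > 4) := by exact_mod_cast h4
          rw [if_pos h4', if_pos h4, foldl_appendD]
          congr 1
          rw [PySem.List.length_pyRange_one]
          simp
        · have h4' : ¬ ((pend.length : Int) > 4) := by exact_mod_cast h4
          rw [if_neg h4', if_neg h4]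
          congr 1
          have hck : (k : Int) - (pend.length : Int) = ((k - pend.length : Nat) : Int) := by
            omega
          rw [hck, PySem.List.slice_natCast]
          have harith : k - (k - pend.length) = pend.length := by omega
          rw [harith]
          have key : (labels.drop (k - pend.length)).take pend.length =
              ((labels.take n).drop (k - pend.length)).take pend.length := by
            rw [List.drop_take, List.take_take]
            congr 1
            omega
          rw [key, ← hrep]
      rw [hstep]
      have h0 : (0 : Int) = ((List.length ([] : List String) : Nat) : Int) := by simp
      have hcast : ((k : Int) + 1) = ((k + 1 : Nat) : Int) := by push_cast; ring
      rw [h0, hcast]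
      rw [ih (k + 1) _ [] (by omega) hxs' (by simp) (by simp)]
      simp only [specLoop, hxd, ne_eq, if_neg, not_not]
    · -- labels[i] != 'D': extend pending run
      have hstep : aStep labels (acc, (pend.length : Int)) (k : Int) =
          (acc, ((pend ++ [x]).length : Int)) := by
        rw [aStep, hget]
        simp only [ne_eq, hxd, not_false_eq_true, if_pos]
        simp
      rw [hstep]
      have hrep' : pend ++ [x] = ((labels.take n).drop ((k + 1) - (pend ++ [x]).length)).take
          (pend ++ [x]).length := by
        have harith : (k + 1) - (pend ++ [x]).length = k - pend.length := by
          simp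
        rw [harith]
        simp only [List.length_append, List.length_cons, List.length_nil]
        rw [List.take_add_one, ← hrep]
        rw [List.getElem?_drop]
        have harith2 : k - pend.length + pend.length = k := by omega
        rw [harith2]
        rw [List.getElem?_eq_getElem (by omega)]
        simp [hx]
      have hcast : ((k : Int) + 1) = ((k + 1 : Nat) : Int) := by push_cast; ring
      rw [hcast]
      rw [ih (k + 1) acc (pend ++ [x]) (by omega) hxs' (by simp; exact hlen) hrep']
      simp only [specLoop, ne_eq, hxd, not_false_eq_true, if_pos]

-- the common unfolding of both ports under Pre_ (all branches in one statement)
theorem ports_eval (tokens labels : List String) (hpre : tokens.length ≤ labels.length) :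
    remove_islands tokens labels =
      ((specLoop (labels.take tokens.length) [] []).1 ++
        (if (trailNonD (labels.take tokens.length)).length > 4
          then List.replicate (trailNonD (labels.take tokens.length)).length "D"
          else if (trailNonD (labels.take tokens.length)).length > 0
            then labels.drop (labels.length - (trailNonD (labels.take tokens.length)).length)
            else [])) ∧
    remove_islands_alt tokens labels =
      ((specLoop (labels.take tokens.length) [] []).1 ++
        runTail (trailNonD (labels.take tokens.length))) := by
  have hfold := foldA labels tokens.length hpre (labels.take tokens.length) 0 [] []
    (by omega) (by simp) (by simp) (by simp)
  constructor
  · rw [remove_islands]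
    simp only [List.length_nil, Nat.cast_zero] at hfold
    rw [hfold]
    rw [specLoop_pend]
    by_cases h4 : (trailNonD (labels.take tokens.length)).length > 4
    · have h4' : (((trailNonD (labels.take tokens.length)).length : Nat) : Int) > 4 := by
        exact_mod_cast h4
      rw [if_pos h4', if_pos h4]
      rw [foldl_appendD]
      congr 2
      rw [PySem.List.length_pyRange_one]
      simp
    · have h4' : ¬ ((((trailNonD (labels.take tokens.length)).length : Nat) : Int) > 4) := by
        exact_mod_cast h4
      rw [if_neg h4', if_neg h4]
      by_cases h0 : (trailNonD (labels.take tokens.length)).length > 0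
      · have h0' : ((((trailNonD (labels.take tokens.length)).length : Nat) : Int) > 0) := by
          exact_mod_cast h0
        rw [if_pos h0', if_pos h0]
        congr 1
        rw [PySem.List.slice_from_neg_natCast (xs := labels) (k := (trailNonD (labels.take tokens.length)).length) h0]
      · have h0' : ¬ ((((trailNonD (labels.take tokens.length)).length : Nat) : Int) > 0) := by
          exact_mod_cast h0
        rw [if_neg h0', if_neg h0]
        simp
  · rw [remove_islands_alt]
    rw [PySem.List.slice_to_natCast]
    rw [altRuns_eq_spec (labels.take tokens.length).length _ (le_refl _)]
    rw [spec1, specLoop_pend]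

-- ===== VERDICT (by name: the statement is the Claim_ definition above) =====
theorem remove_islands_spec : Claim_unchanged_remove_islands := by
  intro tokens labels _ hpre hnd
  unfold Pre_remove_islands at hpre
  unfold D_remove_islands at hnd
  obtain ⟨hA, hB⟩ := ports_eval tokens labels hpre
  rw [hA, hB]
  set t := trailNonD (labels.take tokens.length) with ht
  rw [runTail]
  by_cases h4 : t.length > 4
  · rw [if_pos h4, if_pos h4]
  · rw [if_neg h4, if_neg h4]
    by_cases h0 : t.length > 0
    · rw [if_pos h0]
      congr 1
      by_contra hne
      exact hnd ⟨by omega, by omega, hne⟩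
    · have hnil : t = [] := by
        cases ht' : t with
        | nil => rfl
        | cons a l => rw [ht'] at h0; simp at h0
      rw [if_neg h0, hnil]

theorem remove_islands_changed : Claim_changed_remove_islands := by
  unfold Claim_changed_remove_islands
  refine ⟨by decide, by decide, by decide, by decide, ?_, by decide⟩
  show remove_islands_alt ["a"] ["E", "X"] = ["E"]
  simp [remove_islands_alt, altRuns, PySem.List.slice]

theorem remove_islands_tight : Claim_exact_remove_islands := by
  intro tokens labels _ hpre hd
  unfold Pre_remove_islands at hpre
  unfold D_remove_islands at hd
  obtain ⟨h1, h4, hne⟩ := hd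
  obtain ⟨hA, hB⟩ := ports_eval tokens labels hpre
  rw [hA, hB]
  set t := trailNonD (labels.take tokens.length) with ht
  rw [runTail]
  rw [if_neg (by omega : ¬ t.length > 4), if_neg (by omega : ¬ t.length > 4),
    if_pos (by omega : t.length > 0)]
  intro heq
  exact hne (List.append_cancel_left heq)
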